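-- pv_equiv track=rewrite | github.com/Tehjasonlam/Codes | COSC 1340/Exam 2/Whatisit.py | what_is_it
-- ===== SOURCE A (Python) =====
-- def what_is_it(intList):
--     value = 0
--     for i in range(len(intList)):
--         if intList[i]%2 == 0:
--             value += intList[i]
--         if intList[i]%3 == 0:
--             value -= intList[i]
--     return value
-- ===== SOURCE B (Python) =====
-- def what_is_it(intList):
--     even_sum = sum(x for x in intList if x % 2 == 0)
--     three_sum = sum(x for x in intList if x % 3 == 0)
--     return even_sum - three_sum
-- ===== Notes on version B (the rewrite author's own statement) =====
-- stated objective: simpler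
-- what changed: Replaces the single index loop with two conditionals by two independent value-based filter-sums (even elements, elements divisible by 3), returning their difference.
import Mathlib
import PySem

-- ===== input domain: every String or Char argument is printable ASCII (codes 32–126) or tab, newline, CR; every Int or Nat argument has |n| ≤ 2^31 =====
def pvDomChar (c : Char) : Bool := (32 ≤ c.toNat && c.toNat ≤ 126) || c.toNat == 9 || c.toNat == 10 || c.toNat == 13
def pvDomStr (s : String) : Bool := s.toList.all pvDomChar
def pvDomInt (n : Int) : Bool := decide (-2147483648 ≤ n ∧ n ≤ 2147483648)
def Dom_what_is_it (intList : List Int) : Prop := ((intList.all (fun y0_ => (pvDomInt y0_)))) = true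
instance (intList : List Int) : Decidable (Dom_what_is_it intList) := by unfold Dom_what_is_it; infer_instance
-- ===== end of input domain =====

-- B replaces A's single fused index loop by two independent value-based filter-sums (even sum minus multiples-of-3 sum); objective: simpler.


-- ===== PORT A =====
-- value = 0; for i in range(len(intList)): if intList[i]%2==0: value += intList[i]; if intList[i]%3==0: value -= intList[i]
def what_is_it (intList : List Int) : Int :=
  (PySem.List.pyRange 0 (intList.length : Int) 1).foldl
    (fun value i =>
      let value := if PySem.Int.mod (PySem.List.pyGetD intList i 0) 2 = 0
        then value + PySem.List.pyGetD intList i 0 else value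
      if PySem.Int.mod (PySem.List.pyGetD intList i 0) 3 = 0
        then value - PySem.List.pyGetD intList i 0 else value)
    0

-- ===== PORT B =====
-- even_sum = sum(x for x in intList if x % 2 == 0); three_sum = sum(x for x in intList if x % 3 == 0); return even_sum - three_sum
def what_is_it_alt (intList : List Int) : Int :=
  (intList.filter (fun x => PySem.Int.mod x 2 = 0)).sum
    - (intList.filter (fun x => PySem.Int.mod x 3 = 0)).sum

-- ===== PRECONDITION & SPEC =====
def Spec_what_is_it (intList : List Int) (out : Int) : Prop := out = what_is_it_alt intList
instance (intList : List Int) (out : Int) : Decidable (Spec_what_is_it intList out) := by unfold Spec_what_is_it; infer_instance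

-- ===== CLAIM =====
def Claim_equal_what_is_it : Prop := ∀ (intList : List Int), Dom_what_is_it intList → Spec_what_is_it intList (what_is_it intList)

-- ===== LEMMAS AND PROOFS =====
theorem what_is_it_fold (intList : List Int) (init : Int) :
    intList.foldl
      (fun value x =>
        let value := if PySem.Int.mod x 2 = 0 then value + x else value
        if PySem.Int.mod x 3 = 0 then value - x else value)
      init
    = init + (intList.filter (fun x => PySem.Int.mod x 2 = 0)).sum
        - (intList.filter (fun x => PySem.Int.mod x 3 = 0)).sum := by
  induction intList generalizing init with
  | nil => simp
  | cons x xs ih =>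
    simp only [List.foldl_cons, List.filter_cons, ih]
    by_cases h2 : (2:Int) ∣ x <;> by_cases h3 : (3:Int) ∣ x <;>
      simp [h2, h3] <;> ring

-- ===== VERDICT =====
theorem what_is_it_spec : Claim_equal_what_is_it := by
  intro intList _
  unfold Spec_what_is_it what_is_it what_is_it_alt
  rw [PySem.List.foldl_pyRange_zero_pyGetD' intList 0
    (fun value x =>
      let value := if PySem.Int.mod x 2 = 0 then value + x else value
      if PySem.Int.mod x 3 = 0 then value - x else value) 0]
  rw [what_is_it_fold]
  ring
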